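-- pv_equiv track=rewrite | github.com/luaraperilli/trabalho-akinator-otimizado | akinator.py | encontrar_melhor_pergunta
-- ===== SOURCE A (Python) =====
-- def encontrar_melhor_pergunta(personagens, perguntas):
--     melhor_pergunta = None
--     menor_diferenca = float('inf')
--
--     for pergunta in perguntas:
--         sim = sum(1 for p in personagens if p[pergunta] == 1)
--         nao = sum(1 for p in personagens if p[pergunta] == 0)
--         diferenca = abs(sim - nao)
--
--         if diferenca < menor_diferenca:
--             melhor_pergunta = pergunta
--             menor_diferenca = diferenca
--
--     return melhor_pergunta
-- ===== SOURCE B (Python) =====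
-- def encontrar_melhor_pergunta(personagens, perguntas):
--     # transposed pass: one counter pair per distinct question, filled character by character
--     sim_count = {q: 0 for q in perguntas}
--     nao_count = {q: 0 for q in perguntas}
--     for p in personagens:
--         for q in sim_count:
--             v = p[q]
--             if v == 1:
--                 sim_count[q] += 1
--             elif v == 0:
--                 nao_count[q] += 1
--     melhor = None
--     menor = None
--     for q in perguntas:
--         d = abs(sim_count[q] - nao_count[q])
--         if menor is None or d < menor:
--             melhor = q
--             menor = d
--     return melhor
-- ===== Notes on version B (the rewrite author's own statement) =====
-- stated objective: alternative
-- what changed: Replaces A's two full scans of all characters per question by one transposed pass over the characters that fills two counter dicts keyed by question, followed by a separate first-strict-minimum scan over the questions.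
import Mathlib
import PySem

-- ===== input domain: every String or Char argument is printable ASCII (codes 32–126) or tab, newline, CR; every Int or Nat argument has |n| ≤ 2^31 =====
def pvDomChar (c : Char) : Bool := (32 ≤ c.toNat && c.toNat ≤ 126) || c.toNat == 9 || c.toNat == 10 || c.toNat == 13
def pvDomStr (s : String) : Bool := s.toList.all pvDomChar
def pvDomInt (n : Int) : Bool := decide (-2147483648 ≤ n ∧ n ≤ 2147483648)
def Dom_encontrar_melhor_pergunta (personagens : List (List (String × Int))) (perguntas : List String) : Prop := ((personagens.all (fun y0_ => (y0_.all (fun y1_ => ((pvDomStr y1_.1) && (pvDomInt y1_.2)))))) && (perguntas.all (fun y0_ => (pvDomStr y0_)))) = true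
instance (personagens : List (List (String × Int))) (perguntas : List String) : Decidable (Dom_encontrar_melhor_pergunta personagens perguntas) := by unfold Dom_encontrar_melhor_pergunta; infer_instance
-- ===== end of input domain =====

-- B replaces A's per-question rescans of all characters by one transposed pass filling
-- two counter dicts, then a separate first-strict-minimum scan (objective: alternative).

-- p[q] on a dict given as an association list: first match (shared transliteration of the lookup)
def pvLookup (p : List (String × Int)) (q : String) : Option Int :=
  (p.find? (fun kv => kv.1 == q)).map (·.2)

-- ===== PORT A =====
def encontrar_melhor_pergunta (personagens : List (List (String × Int))) (perguntas : List String) : Option String :=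
  (perguntas.foldl (fun (st : Option String × Option Int) pergunta =>
      let sim : Int := personagens.countP (fun p => pvLookup p pergunta == some 1)
      let nao : Int := personagens.countP (fun p => pvLookup p pergunta == some 0)
      let diferenca := |sim - nao|
      match st.2 with
      | none => (some pergunta, some diferenca)        -- menor_diferenca starts at +inf: first question always wins
      | some m => if diferenca < m then (some pergunta, some diferenca) else st)
    (none, none)).1

-- ===== PORT B =====
-- body of B's inner loop over the counter keys, for one character p
def pvStepB (p : List (String × Int)) (sc : PySem.Dict String Int × PySem.Dict String Int)
    (q : String) : PySem.Dict String Int × PySem.Dict String Int :=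
  let v := pvLookup p q
  if v == some 1 then (sc.1.modify q 0 (· + 1), sc.2)
  else if v == some 0 then (sc.1, sc.2.modify q 0 (· + 1))
  else sc

def encontrar_melhor_pergunta_alt (personagens : List (List (String × Int))) (perguntas : List String) : Option String :=
  let keys := PySem.List.dedup perguntas            -- the keys of {q: 0 for q in perguntas}
  let sc0 : PySem.Dict String Int × PySem.Dict String Int :=
    (keys.foldl (fun d q => d.insert q 0) PySem.Dict.empty,
     keys.foldl (fun d q => d.insert q 0) PySem.Dict.empty)
  let sc := personagens.foldl (fun sc p => keys.foldl (pvStepB p) sc) sc0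
  (perguntas.foldl (fun (st : Option String × Option Int) q =>
      let d := |sc.1.getD q 0 - sc.2.getD q 0|
      match st.2 with
      | none => (some q, some d)
      | some m => if d < m then (some q, some d) else st)
    (none, none)).1

-- ===== PRECONDITION & SPEC =====
-- Pre_ excludes exactly the inputs where Python A raises KeyError: some pergunta missing from some personagem
def Pre_encontrar_melhor_pergunta (personagens : List (List (String × Int))) (perguntas : List String) : Prop :=
  ∀ q ∈ perguntas, ∀ p ∈ personagens, q ∈ p.map Prod.fst
instance (personagens : List (List (String × Int))) (perguntas : List String) : Decidable (Pre_encontrar_melhor_pergunta personagens perguntas) := by unfold Pre_encontrar_melhor_pergunta; infer_instance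

def pvWitness_encontrar_melhor_pergunta : (List (List (String × Int))) × List String :=
  ([[("a", 1), ("b", 0)], [("a", 1), ("b", 1)]], ["a", "b"])

def Spec_encontrar_melhor_pergunta (personagens : List (List (String × Int))) (perguntas : List String) (out : Option String) : Prop := out = encontrar_melhor_pergunta_alt personagens perguntas
instance (personagens : List (List (String × Int))) (perguntas : List String) (out : Option String) : Decidable (Spec_encontrar_melhor_pergunta personagens perguntas out) := by unfold Spec_encontrar_melhor_pergunta; infer_instance

-- ===== CLAIM (what is proved, stated in full; the proofs are below) =====
def Claim_equal_encontrar_melhor_pergunta : Prop := ∀ (personagens : List (List (String × Int))) (perguntas : List String), Dom_encontrar_melhor_pergunta personagens perguntas → Pre_encontrar_melhor_pergunta personagens perguntas → Spec_encontrar_melhor_pergunta personagens perguntas (encontrar_melhor_pergunta personagens perguntas)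

-- ===== LEMMAS AND PROOFS =====

-- a key not in l is untouched by the inner loop
theorem pv_untouched (l : List String) (p : List (String × Int))
    (sc : PySem.Dict String Int × PySem.Dict String Int) (q : String) (hq : q ∉ l) :
    (l.foldl (pvStepB p) sc).1.getD q 0 = sc.1.getD q 0 ∧
    (l.foldl (pvStepB p) sc).2.getD q 0 = sc.2.getD q 0 := by
  induction l generalizing sc with
  | nil => exact ⟨rfl, rfl⟩
  | cons x xs ih =>
    have hxq : x ≠ q := fun h => hq (h ▸ List.mem_cons_self ..)
    have hq' : q ∉ xs := fun h => hq (List.mem_cons_of_mem _ h)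
    have h1 := ih (sc := pvStepB p sc x) hq'
    constructor
    · rw [List.foldl_cons, h1.1]
      simp only [pvStepB]
      split_ifs <;> simp [PySem.Dict.getD_modify, Ne.symm hxq]
    · rw [List.foldl_cons, h1.2]
      simp only [pvStepB]
      split_ifs <;> simp [PySem.Dict.getD_modify, Ne.symm hxq]

theorem pv_inner (l : List String) (hn : l.Nodup) (p : List (String × Int))
    (sc : PySem.Dict String Int × PySem.Dict String Int) (q : String) (hq : q ∈ l) :
    (l.foldl (pvStepB p) sc).1.getD q 0
      = sc.1.getD q 0 + (if pvLookup p q == some 1 then 1 else 0) ∧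
    (l.foldl (pvStepB p) sc).2.getD q 0
      = sc.2.getD q 0 + (if pvLookup p q == some 0 then 1 else 0) := by
  induction l generalizing sc with
  | nil => cases hq
  | cons x xs ih =>
    rw [List.nodup_cons] at hn
    rcases List.mem_cons.mp hq with h | h
    · subst h
      have hu := pv_untouched xs p (pvStepB p sc q) q hn.1
      constructor
      · rw [List.foldl_cons, hu.1]
        simp only [pvStepB]
        split_ifs with h1 h0 <;> simp_all [PySem.Dict.getD_modify_self]
      · rw [List.foldl_cons, hu.2]
        simp only [pvStepB]
        split_ifs with h1 h0 <;> simp_all [PySem.Dict.getD_modify_self]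
    · have hxq : x ≠ q := fun he => hn.1 (he ▸ h)
      have h1 := ih hn.2 (sc := pvStepB p sc x) h
      constructor
      · rw [List.foldl_cons, h1.1]
        simp only [pvStepB]
        split_ifs <;> simp [PySem.Dict.getD_modify, Ne.symm hxq]
      · rw [List.foldl_cons, h1.2]
        simp only [pvStepB]
        split_ifs <;> simp [PySem.Dict.getD_modify, Ne.symm hxq]

theorem pv_outer (ps : List (List (String × Int))) (keys : List String) (hn : keys.Nodup)
    (q : String) (hq : q ∈ keys) (sc : PySem.Dict String Int × PySem.Dict String Int) :
    (ps.foldl (fun sc p => keys.foldl (pvStepB p) sc) sc).1.getD q 0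
      = sc.1.getD q 0 + (ps.countP (fun p => pvLookup p q == some 1) : Int) ∧
    (ps.foldl (fun sc p => keys.foldl (pvStepB p) sc) sc).2.getD q 0
      = sc.2.getD q 0 + (ps.countP (fun p => pvLookup p q == some 0) : Int) := by
  induction ps generalizing sc with
  | nil => simp
  | cons p ps ih =>
    have hi := pv_inner keys hn p sc q hq
    have ho := ih (sc := keys.foldl (pvStepB p) sc)
    rw [List.foldl_cons]
    constructor
    · rw [ho.1, hi.1, List.countP_cons]
      split_ifs <;> push_cast <;> (simp_all; try ring)
    · rw [ho.2, hi.2, List.countP_cons]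
      split_ifs <;> push_cast <;> (simp_all; try ring)

theorem pv_init (l : List String) (d : PySem.Dict String Int) (h : ∀ q, d.getD q 0 = 0)
    (q : String) : (l.foldl (fun d q => d.insert q 0) d).getD q 0 = 0 := by
  induction l generalizing d with
  | nil => exact h q
  | cons x xs ih =>
    rw [List.foldl_cons]
    exact ih _ (fun r => by rw [PySem.Dict.getD_insert]; split_ifs <;> simp [h])

-- ===== VERDICT (by name: the statement is the Claim_ definition above) =====
theorem encontrar_melhor_pergunta_spec : Claim_equal_encontrar_melhor_pergunta := by
  intro personagens perguntas _ _
  have hnd : (PySem.List.dedup perguntas).Nodup := PySem.List.nodup_dedup perguntas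
  unfold Spec_encontrar_melhor_pergunta encontrar_melhor_pergunta encontrar_melhor_pergunta_alt
  simp only []
  congr 1
  apply PySem.List.foldl_congr_mem
  intro acc q hq
  have hmem : q ∈ PySem.List.dedup perguntas := (PySem.List.mem_dedup _ _).mpr hq
  have hinit : ∀ r : String,
      ((PySem.List.dedup perguntas).foldl (fun d q => d.insert q 0)
        (PySem.Dict.empty : PySem.Dict String Int)).getD r 0 = 0 :=
    pv_init _ _ (fun r => by simp)
  have ho := pv_outer personagens (PySem.List.dedup perguntas) hnd q hmem
      ((PySem.List.dedup perguntas).foldl (fun d q => d.insert q 0) PySem.Dict.empty,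
       (PySem.List.dedup perguntas).foldl (fun d q => d.insert q 0) PySem.Dict.empty)
  rw [ho.1, ho.2, hinit q]
  simp
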